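-- pv_equiv track=rewrite | github.com/sfw/loom | src/loom/engine/orchestrator/validity.py | _claim_counts
-- ===== SOURCE A (Python) =====
-- _CLAIM_TERMINAL_UNRESOLVED = frozenset({
--     "contradicted",
--     "insufficient_evidence",
--     "extracted",
--     "stale",
-- })
--
-- def _claim_counts(claims: list[dict[str, object]]) -> dict[str, int]:
--     counts = {
--         "extracted": len(claims),
--         "supported": 0,
--         "contradicted": 0,
--         "insufficient_evidence": 0,
--         "stale": 0,
--         "pruned": 0,
--         "unresolved": 0,
--         "critical_total": 0,
--         "critical_supported": 0,
--         "critical_contradicted": 0,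
--     }
--     for claim in claims:
--         status = str(claim.get("status", "") or "").strip().lower()
--         if status in counts:
--             counts[status] += 1
--         if status in _CLAIM_TERMINAL_UNRESOLVED:
--             counts["unresolved"] += 1
--         criticality = str(claim.get("criticality", "") or "").strip().lower()
--         if criticality != "critical":
--             continue
--         counts["critical_total"] += 1
--         if status == "supported":
--             counts["critical_supported"] += 1
--         elif status == "contradicted":
--             counts["critical_contradicted"] += 1
--     return counts
-- ===== SOURCE B (Python) =====
-- from collections import Counter
--
-- _CLAIM_TERMINAL_UNRESOLVED = frozenset({
--     "contradicted",
--     "insufficient_evidence",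
--     "extracted",
--     "stale",
-- })
--
--
-- def _claim_counts(claims):
--     def norm(value):
--         return str(value or "").strip().lower()
--
--     statuses = [norm(c.get("status", "")) for c in claims]
--     crit = [s for c, s in zip(claims, statuses)
--             if norm(c.get("criticality", "")) == "critical"]
--
--     # Every increment the report performs is a "bump" on one key of the table:
--     # each claim bumps the key named by its status, and the aggregate keys are
--     # bumped by their own tallies.  Merge all bumps, then add them to the base
--     # table (bumps on names that are not table keys fall away).
--     bumps = Counter(statuses)
--     bumps["unresolved"] += sum(1 for s in statuses if s in _CLAIM_TERMINAL_UNRESOLVED)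
--     bumps["critical_total"] += len(crit)
--     bumps["critical_supported"] += sum(1 for s in crit if s == "supported")
--     bumps["critical_contradicted"] += sum(1 for s in crit if s == "contradicted")
--
--     base = {
--         "extracted": len(claims),
--         "supported": 0,
--         "contradicted": 0,
--         "insufficient_evidence": 0,
--         "stale": 0,
--         "pruned": 0,
--         "unresolved": 0,
--         "critical_total": 0,
--         "critical_supported": 0,
--         "critical_contradicted": 0,
--     }
--     return {k: v + bumps[k] for k, v in base.items()}
-- ===== Notes on version B (the rewrite author's own statement) =====
-- stated objective: alternative
-- what changed: B separates tallying from the result table: it normalizes all statuses once in staged passes, merges every increment into a single bump Counter (per-status occurrences plus the unresolved/critical aggregate tallies), and produces the result as base table + bumps in one final comprehension, instead of A's single stateful dict-mutating loop with branching; trade: several short passes over the data instead of one loop.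
import Mathlib
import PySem

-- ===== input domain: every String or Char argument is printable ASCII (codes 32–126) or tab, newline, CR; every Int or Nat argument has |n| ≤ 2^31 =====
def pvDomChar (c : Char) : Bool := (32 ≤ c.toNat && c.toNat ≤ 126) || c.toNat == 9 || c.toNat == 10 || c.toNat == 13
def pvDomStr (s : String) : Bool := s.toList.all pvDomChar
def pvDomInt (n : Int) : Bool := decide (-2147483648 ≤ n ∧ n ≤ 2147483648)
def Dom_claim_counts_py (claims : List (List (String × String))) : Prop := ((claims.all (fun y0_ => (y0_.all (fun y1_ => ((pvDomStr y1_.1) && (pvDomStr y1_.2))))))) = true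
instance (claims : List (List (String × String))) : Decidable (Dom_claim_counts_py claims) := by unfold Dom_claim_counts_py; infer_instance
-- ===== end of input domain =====

-- B merges every increment into one bump Counter built by staged passes over the
-- normalized statuses and adds it to the base table, instead of A's stateful
-- dict-mutating loop (objective: alternative decomposition, same cost).

-- ===== PORT A =====
-- str(claim.get(k, "") or "").strip().lower()  (values are strings, so `or ""`/str() are identity on "" and non-empty alike)
def pyNorm (v : String) : String := PySem.Str.lower (PySem.Str.strip v)

def pvStatusOf (claim : List (String × String)) : String :=
  pyNorm ((PySem.Dict.mk claim).getD "status" "")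

def pvCritOf (claim : List (String × String)) : String :=
  pyNorm ((PySem.Dict.mk claim).getD "criticality" "")

def pvStepA (d : PySem.Dict String Int) (claim : List (String × String)) : PySem.Dict String Int :=
  let status := pvStatusOf claim
  let d1 := if d.contains status then d.modify status 0 (· + 1) else d
  let d2 := if status ∈ (["contradicted", "insufficient_evidence", "extracted", "stale"] : List String)
            then d1.modify "unresolved" 0 (· + 1) else d1
  let criticality := pvCritOf claim
  if criticality ≠ "critical" then d2
  else
    let d3 := d2.modify "critical_total" 0 (· + 1)
    if status = "supported" then d3.modify "critical_supported" 0 (· + 1)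
    else if status = "contradicted" then d3.modify "critical_contradicted" 0 (· + 1)
    else d3

def claim_counts_py (claims : List (List (String × String))) : List (String × Int) :=
  (claims.foldl pvStepA (PySem.Dict.mk
    [("extracted", (claims.length : Int)), ("supported", 0), ("contradicted", 0),
     ("insufficient_evidence", 0), ("stale", 0), ("pruned", 0), ("unresolved", 0),
     ("critical_total", 0), ("critical_supported", 0), ("critical_contradicted", 0)])).items

-- ===== PORT B =====
def claim_counts_py_alt (claims : List (List (String × String))) : List (String × Int) :=
  let statuses := claims.map pvStatusOf
  let crit := ((claims.zip statuses).filter (fun p => pvCritOf p.1 == "critical")).map (·.2)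
  let bumps := PySem.Dict.counter statuses
  let bumps := bumps.modify "unresolved" 0
    (· + ((statuses.filter (fun s => decide (s ∈ (["contradicted", "insufficient_evidence", "extracted", "stale"] : List String)))).length : Int))
  let bumps := bumps.modify "critical_total" 0 (· + (crit.length : Int))
  let bumps := bumps.modify "critical_supported" 0 (· + ((crit.filter (fun s => s == "supported")).length : Int))
  let bumps := bumps.modify "critical_contradicted" 0 (· + ((crit.filter (fun s => s == "contradicted")).length : Int))
  -- base is a dict literal with pairwise-distinct keys: iterating it yields these pairs in order
  let base : List (String × Int) :=
    [("extracted", (claims.length : Int)), ("supported", 0), ("contradicted", 0),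
     ("insufficient_evidence", 0), ("stale", 0), ("pruned", 0), ("unresolved", 0),
     ("critical_total", 0), ("critical_supported", 0), ("critical_contradicted", 0)]
  base.map (fun kv => (kv.1, kv.2 + bumps.getD kv.1 0))

-- ===== PRECONDITION & SPEC =====
def Spec_claim_counts_py (claims : List (List (String × String))) (out : List (String × Int)) : Prop := out = claim_counts_py_alt claims
instance (claims : List (List (String × String))) (out : List (String × Int)) : Decidable (Spec_claim_counts_py claims out) := by unfold Spec_claim_counts_py; infer_instance

-- ===== CLAIM (what is proved, stated in full; the proofs are below) =====
def Claim_equal_claim_counts_py : Prop := ∀ (claims : List (List (String × String))), Dom_claim_counts_py claims → Spec_claim_counts_py claims (claim_counts_py claims)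

-- ===== LEMMAS AND PROOFS =====
def pvMk10 (e su co ie stl pr un ct cs cc : Int) : PySem.Dict String Int :=
  PySem.Dict.mk
    [("extracted", e), ("supported", su), ("contradicted", co),
     ("insufficient_evidence", ie), ("stale", stl), ("pruned", pr), ("unresolved", un),
     ("critical_total", ct), ("critical_supported", cs), ("critical_contradicted", cc)]

def pvB (s : String) (k : String) : Int := if s = k then 1 else 0

theorem pvStepA_mk10 (e su co ie stl pr un ct cs cc : Int) (claim : List (String × String)) :
    pvStepA (pvMk10 e su co ie stl pr un ct cs cc) claim =
      pvMk10 (e + pvB (pvStatusOf claim) "extracted")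
             (su + pvB (pvStatusOf claim) "supported")
             (co + pvB (pvStatusOf claim) "contradicted")
             (ie + pvB (pvStatusOf claim) "insufficient_evidence")
             (stl + pvB (pvStatusOf claim) "stale")
             (pr + pvB (pvStatusOf claim) "pruned")
             (un + pvB (pvStatusOf claim) "unresolved"
                 + (pvB (pvStatusOf claim) "contradicted" + pvB (pvStatusOf claim) "insufficient_evidence"
                    + pvB (pvStatusOf claim) "extracted" + pvB (pvStatusOf claim) "stale"))
             (ct + pvB (pvStatusOf claim) "critical_total" + pvB (pvCritOf claim) "critical")
             (cs + pvB (pvStatusOf claim) "critical_supported"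
                 + (if pvCritOf claim = "critical" then pvB (pvStatusOf claim) "supported" else 0))
             (cc + pvB (pvStatusOf claim) "critical_contradicted"
                 + (if pvCritOf claim = "critical" then pvB (pvStatusOf claim) "contradicted" else 0)) := by
  unfold pvStepA
  generalize pvStatusOf claim = s
  generalize pvCritOf claim = cr
  by_cases h1 : s = "extracted"
  · subst h1; by_cases hc : cr = "critical" <;>
      simp [pvMk10, pvB, PySem.Dict.modify, PySem.Dict.insert, PySem.Dict.getD, PySem.Dict.get?, PySem.Dict.contains, hc]
  by_cases h2 : s = "supported"
  · subst h2; by_cases hc : cr = "critical" <;>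
      simp [pvMk10, pvB, PySem.Dict.modify, PySem.Dict.insert, PySem.Dict.getD, PySem.Dict.get?, PySem.Dict.contains, hc]
  by_cases h3 : s = "contradicted"
  · subst h3; by_cases hc : cr = "critical" <;>
      simp [pvMk10, pvB, PySem.Dict.modify, PySem.Dict.insert, PySem.Dict.getD, PySem.Dict.get?, PySem.Dict.contains, hc]
  by_cases h4 : s = "insufficient_evidence"
  · subst h4; by_cases hc : cr = "critical" <;>
      simp [pvMk10, pvB, PySem.Dict.modify, PySem.Dict.insert, PySem.Dict.getD, PySem.Dict.get?, PySem.Dict.contains, hc]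
  by_cases h5 : s = "stale"
  · subst h5; by_cases hc : cr = "critical" <;>
      simp [pvMk10, pvB, PySem.Dict.modify, PySem.Dict.insert, PySem.Dict.getD, PySem.Dict.get?, PySem.Dict.contains, hc]
  by_cases h6 : s = "pruned"
  · subst h6; by_cases hc : cr = "critical" <;>
      simp [pvMk10, pvB, PySem.Dict.modify, PySem.Dict.insert, PySem.Dict.getD, PySem.Dict.get?, PySem.Dict.contains, hc]
  by_cases h7 : s = "unresolved"
  · subst h7; by_cases hc : cr = "critical" <;>
      simp [pvMk10, pvB, PySem.Dict.modify, PySem.Dict.insert, PySem.Dict.getD, PySem.Dict.get?, PySem.Dict.contains, hc]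
  by_cases h8 : s = "critical_total"
  · subst h8; by_cases hc : cr = "critical" <;>
      simp [pvMk10, pvB, PySem.Dict.modify, PySem.Dict.insert, PySem.Dict.getD, PySem.Dict.get?, PySem.Dict.contains, hc]
  by_cases h9 : s = "critical_supported"
  · subst h9; by_cases hc : cr = "critical" <;>
      simp [pvMk10, pvB, PySem.Dict.modify, PySem.Dict.insert, PySem.Dict.getD, PySem.Dict.get?, PySem.Dict.contains, hc]
  by_cases h10 : s = "critical_contradicted"
  · subst h10; by_cases hc : cr = "critical" <;>
      simp [pvMk10, pvB, PySem.Dict.modify, PySem.Dict.insert, PySem.Dict.getD, PySem.Dict.get?, PySem.Dict.contains, hc]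
  have n1 : ¬"extracted" = s := fun h => h1 h.symm
  have n2 : ¬"supported" = s := fun h => h2 h.symm
  have n3 : ¬"contradicted" = s := fun h => h3 h.symm
  have n4 : ¬"insufficient_evidence" = s := fun h => h4 h.symm
  have n5 : ¬"stale" = s := fun h => h5 h.symm
  have n6 : ¬"pruned" = s := fun h => h6 h.symm
  have n7 : ¬"unresolved" = s := fun h => h7 h.symm
  have n8 : ¬"critical_total" = s := fun h => h8 h.symm
  have n9 : ¬"critical_supported" = s := fun h => h9 h.symm
  have n10 : ¬"critical_contradicted" = s := fun h => h10 h.symm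
  by_cases hc : cr = "critical" <;>
    simp [pvMk10, pvB, PySem.Dict.modify, PySem.Dict.insert, PySem.Dict.getD, PySem.Dict.get?, PySem.Dict.contains, hc, h1, h2, h3, h4, h5, h6, h7, h8, h9, h10, n1, n2, n3, n4, n5, n6, n7, n8, n9, n10]

theorem pvFoldA (l : List (List (String × String))) :
    ∀ e su co ie stl pr un ct cs cc,
    l.foldl pvStepA (pvMk10 e su co ie stl pr un ct cs cc) =
      pvMk10 (e + ((l.map pvStatusOf).count "extracted" : Int))
             (su + ((l.map pvStatusOf).count "supported" : Int))
             (co + ((l.map pvStatusOf).count "contradicted" : Int))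
             (ie + ((l.map pvStatusOf).count "insufficient_evidence" : Int))
             (stl + ((l.map pvStatusOf).count "stale" : Int))
             (pr + ((l.map pvStatusOf).count "pruned" : Int))
             (un + ((l.map pvStatusOf).count "unresolved" : Int)
                 + (((l.map pvStatusOf).count "contradicted" : Int) + ((l.map pvStatusOf).count "insufficient_evidence" : Int)
                    + ((l.map pvStatusOf).count "extracted" : Int) + ((l.map pvStatusOf).count "stale" : Int)))
             (ct + ((l.map pvStatusOf).count "critical_total" : Int) + (((l.filter (fun c => pvCritOf c == "critical")).length : Int)))
             (cs + ((l.map pvStatusOf).count "critical_supported" : Int)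
                 + (((l.filter (fun c => pvCritOf c == "critical")).map pvStatusOf).count "supported" : Int))
             (cc + ((l.map pvStatusOf).count "critical_contradicted" : Int)
                 + (((l.filter (fun c => pvCritOf c == "critical")).map pvStatusOf).count "contradicted" : Int)) := by
  induction l with
  | nil => intro e su co ie stl pr un ct cs cc; simp
  | cons hd t ih =>
    intro e su co ie stl pr un ct cs cc
    rw [List.foldl_cons, pvStepA_mk10, ih]
    simp only [pvMk10, PySem.Dict.mk.injEq, List.cons.injEq, Prod.mk.injEq, true_and, and_true]
    simp only [pvB, List.map_cons, List.count_cons, List.filter_cons, beq_iff_eq]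
    refine ⟨?_, ?_, ?_, ?_, ?_, ?_, ?_, ?_, ?_, ?_⟩ <;>
      · split_ifs <;> simp_all <;> omega

-- B's crit-status list, rewritten without the zip
theorem pvCritList (claims : List (List (String × String))) :
    ((claims.zip (claims.map pvStatusOf)).filter (fun p => pvCritOf p.1 == "critical")).map (·.2)
      = (claims.filter (fun c => pvCritOf c == "critical")).map pvStatusOf := by
  induction claims with
  | nil => rfl
  | cons hd t ih =>
    simp only [List.map_cons, List.zip_cons_cons, List.filter_cons]
    by_cases h : (pvCritOf hd == "critical") = true <;> simp [h, ih]

-- A's result, in closed form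
theorem pvA_closed (claims : List (List (String × String))) :
    claim_counts_py claims =
      [("extracted", (claims.length : Int) + ((claims.map pvStatusOf).count "extracted" : Int)),
       ("supported", ((claims.map pvStatusOf).count "supported" : Int)),
       ("contradicted", ((claims.map pvStatusOf).count "contradicted" : Int)),
       ("insufficient_evidence", ((claims.map pvStatusOf).count "insufficient_evidence" : Int)),
       ("stale", ((claims.map pvStatusOf).count "stale" : Int)),
       ("pruned", ((claims.map pvStatusOf).count "pruned" : Int)),
       ("unresolved", ((claims.map pvStatusOf).count "unresolved" : Int)
           + (((claims.map pvStatusOf).count "contradicted" : Int) + ((claims.map pvStatusOf).count "insufficient_evidence" : Int)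
              + ((claims.map pvStatusOf).count "extracted" : Int) + ((claims.map pvStatusOf).count "stale" : Int))),
       ("critical_total", ((claims.map pvStatusOf).count "critical_total" : Int)
           + (((claims.filter (fun c => pvCritOf c == "critical")).length : Int))),
       ("critical_supported", ((claims.map pvStatusOf).count "critical_supported" : Int)
           + (((claims.filter (fun c => pvCritOf c == "critical")).map pvStatusOf).count "supported" : Int)),
       ("critical_contradicted", ((claims.map pvStatusOf).count "critical_contradicted" : Int)
           + (((claims.filter (fun c => pvCritOf c == "critical")).map pvStatusOf).count "contradicted" : Int))] := by
  unfold claim_counts_py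
  rw [show (PySem.Dict.mk
    [("extracted", (claims.length : Int)), ("supported", 0), ("contradicted", 0),
     ("insufficient_evidence", 0), ("stale", 0), ("pruned", 0), ("unresolved", 0),
     ("critical_total", 0), ("critical_supported", 0), ("critical_contradicted", 0)]) =
    pvMk10 (claims.length : Int) 0 0 0 0 0 0 0 0 0 from rfl, pvFoldA]
  simp [pvMk10]

-- B's result, in closed form (same shape as A's)
theorem pvTermLen (l : List String) :
    (((l.filter (fun s => decide (s ∈ (["contradicted", "insufficient_evidence", "extracted", "stale"] : List String)))).length : Int))
      = (l.count "contradicted" : Int) + (l.count "insufficient_evidence" : Int)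
        + (l.count "extracted" : Int) + (l.count "stale" : Int) := by
  induction l with
  | nil => simp
  | cons a t ih =>
    simp only [List.filter_cons, List.count_cons]
    by_cases h1 : a = "contradicted"
    · simp [h1] at *; omega
    by_cases h2 : a = "insufficient_evidence"
    · simp [h2] at *; omega
    by_cases h3 : a = "extracted"
    · simp [h3] at *; omega
    by_cases h4 : a = "stale"
    · simp [h4] at *; omega
    simp [h1, h2, h3, h4] at *; omega

theorem pvEqLen (l : List String) (k : String) :
    (((l.filter (fun s => s == k)).length : Int)) = (l.count k : Int) := by
  simp [List.count, List.countP_eq_length_filter]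

theorem pvB_closed (claims : List (List (String × String))) :
    claim_counts_py_alt claims =
      [("extracted", (claims.length : Int) + ((claims.map pvStatusOf).count "extracted" : Int)),
       ("supported", ((claims.map pvStatusOf).count "supported" : Int)),
       ("contradicted", ((claims.map pvStatusOf).count "contradicted" : Int)),
       ("insufficient_evidence", ((claims.map pvStatusOf).count "insufficient_evidence" : Int)),
       ("stale", ((claims.map pvStatusOf).count "stale" : Int)),
       ("pruned", ((claims.map pvStatusOf).count "pruned" : Int)),
       ("unresolved", ((claims.map pvStatusOf).count "unresolved" : Int)
           + (((claims.map pvStatusOf).count "contradicted" : Int) + ((claims.map pvStatusOf).count "insufficient_evidence" : Int)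
              + ((claims.map pvStatusOf).count "extracted" : Int) + ((claims.map pvStatusOf).count "stale" : Int))),
       ("critical_total", ((claims.map pvStatusOf).count "critical_total" : Int)
           + (((claims.filter (fun c => pvCritOf c == "critical")).length : Int))),
       ("critical_supported", ((claims.map pvStatusOf).count "critical_supported" : Int)
           + (((claims.filter (fun c => pvCritOf c == "critical")).map pvStatusOf).count "supported" : Int)),
       ("critical_contradicted", ((claims.map pvStatusOf).count "critical_contradicted" : Int)
           + (((claims.filter (fun c => pvCritOf c == "critical")).map pvStatusOf).count "contradicted" : Int))] := by
  unfold claim_counts_py_alt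
  simp only [pvCritList, List.map_cons, List.map_nil, List.length_map,
    PySem.Dict.getD_modify, PySem.Dict.getD_counter, pvTermLen, pvEqLen]
  simp

-- ===== VERDICT (by name: the statement is the Claim_ definition above) =====
theorem claim_counts_py_spec : Claim_equal_claim_counts_py := by
  intro claims _
  unfold Spec_claim_counts_py
  rw [pvA_closed, pvB_closed]
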